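-- pv_equiv track=rewrite | github.com/appacademy/SWEO-Part-Time-Resources | 4-Module/4-week/4-day/test.py | solution
-- ===== SOURCE A (Python) =====
-- def solution(x, y):
--     obj = {}
--     for id in x:
--         if(obj.get(id)):
--             obj[id] += 1
--         else:
--             obj[id] = 1
--     for id in y:
--         if(obj.get(id)):
--             obj[id] += 1
--         else:
--             obj[id] = 1
--     for key, value in obj.items():
--         if((value % 2) == 1):
--             return key
-- ===== SOURCE B (Python) =====
-- def solution(x, y):
--     z = x + y
--     seen = set()
--     for v in z:
--         if v not in seen:
--             seen.add(v)
--             if z.count(v) % 2 == 1: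
--                 return v
--     return None
-- ===== Notes on version B (the rewrite author's own statement) =====
-- stated objective: alternative
-- what changed: Replaces A's two dict-counting loops plus an items scan by one pass over the concatenated list with a first-occurrence set, testing each new element's parity directly via list.count and returning early.
import Mathlib
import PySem

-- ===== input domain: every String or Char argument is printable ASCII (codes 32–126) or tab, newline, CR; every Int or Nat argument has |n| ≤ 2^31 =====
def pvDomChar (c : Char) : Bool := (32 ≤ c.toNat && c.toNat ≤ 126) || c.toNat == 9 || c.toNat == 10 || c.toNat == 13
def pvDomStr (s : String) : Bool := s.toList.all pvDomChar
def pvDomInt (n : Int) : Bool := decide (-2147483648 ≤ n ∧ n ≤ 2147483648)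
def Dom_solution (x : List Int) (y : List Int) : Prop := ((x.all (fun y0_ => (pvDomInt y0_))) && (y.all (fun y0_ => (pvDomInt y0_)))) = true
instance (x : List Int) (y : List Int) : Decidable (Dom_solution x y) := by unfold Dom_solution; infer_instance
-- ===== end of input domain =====

-- B replaces A's two dict-counting loops + items scan by one pass over x ++ y with a
-- first-occurrence set, testing each new element's count parity directly (alternative decomposition).

-- ===== PORT A =====
-- one loop body: 'if obj.get(id): obj[id] += 1 else: obj[id] = 1'
def pvStepA (d : PySem.Dict Int Int) (id : Int) : PySem.Dict Int Int :=
  match d.get? id with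
  | some v => if v ≠ 0 then d.insert id (v + 1) else d.insert id 1
  | none => d.insert id 1

def solution (x : List Int) (y : List Int) : Option Int :=
  let d1 := x.foldl pvStepA PySem.Dict.empty
  let d2 := y.foldl pvStepA d1
  match d2.items.find? (fun p => PySem.Int.mod p.2 2 == 1) with
  | some p => some p.1
  | none => none

-- ===== PORT B =====
-- 'for v in z: if v not in seen: seen.add(v); if z.count(v) % 2 == 1: return v'
def pvGoB (z : List Int) : List Int → PySem.Set Int → Option Int
  | [], _ => none
  | v :: rest, seen =>
    if PySem.Set.contains seen v then pvGoB z rest seen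
    else
      let seen' := PySem.Set.add seen v
      if PySem.Int.mod ((z.count v : Nat) : Int) 2 == 1 then some v
      else pvGoB z rest seen'

def solution_alt (x : List Int) (y : List Int) : Option Int :=
  let z := x ++ y
  pvGoB z z PySem.Set.empty

-- ===== PRECONDITION & SPEC =====
def Spec_solution (x : List Int) (y : List Int) (out : Option Int) : Prop := out = solution_alt x y
instance (x : List Int) (y : List Int) (out : Option Int) : Decidable (Spec_solution x y out) := by unfold Spec_solution; infer_instance

-- ===== CLAIM (what is proved, stated in full; the proofs are below) =====
def Claim_equal_solution : Prop := ∀ (x : List Int) (y : List Int), Dom_solution x y → Spec_solution x y (solution x y)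

-- ===== LEMMAS AND PROOFS =====

-- A's loop body is the counting insert
lemma pvStepA_eq (d : PySem.Dict Int Int) (id : Int) :
    pvStepA d id = d.insert id (d.getD id 0 + 1) := by
  unfold pvStepA
  cases h : d.get? id with
  | none => simp [PySem.Dict.getD_eq_get?_getD, h]
  | some v =>
    by_cases hv : v = 0 <;>
      simp [hv, PySem.Dict.getD_eq_get?_getD, h]

-- A's two loops build Counter(x ++ y)
lemma pvDictA (x y : List Int) :
    y.foldl pvStepA (x.foldl pvStepA PySem.Dict.empty) = PySem.Dict.counter (x ++ y) := by
  have hf : pvStepA = fun d id => d.insert id (d.getD id 0 + 1) := by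
    funext d id; exact pvStepA_eq d id
  rw [← List.foldl_append, hf, PySem.Dict.foldl_insert_getD_add_one_eq_counter]

-- A scans distinct elements in first-occurrence order, testing count parity
lemma pvA_char (x y : List Int) :
    solution x y =
      (PySem.Set.ofList (x ++ y)).find?
        (fun k => PySem.Int.mod (((x ++ y).count k : Nat) : Int) 2 == 1) := by
  unfold solution
  simp only [pvDictA x y, PySem.Dict.items_counter, List.find?_map, Function.comp_def]
  cases h : (PySem.Set.ofList (x ++ y)).find?
      (fun k => PySem.Int.mod (((x ++ y).count k : Nat) : Int) 2 == 1) with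
  | none => rfl
  | some k => rfl

-- Set.update only appends
lemma pvUpdate_prefix (l : List Int) : ∀ s : PySem.Set Int, ∃ t, PySem.Set.update s l = s ++ t := by
  induction l with
  | nil => intro s; exact ⟨[], by simp [PySem.Set.update]⟩
  | cons a l ih =>
    intro s
    obtain ⟨t, ht⟩ := ih (PySem.Set.add s a)
    by_cases h : a ∈ s
    · exact ⟨t, by simpa [PySem.Set.update, PySem.Set.add_of_mem h] using ht⟩
    · exact ⟨a :: t, by simpa [PySem.Set.update, PySem.Set.add_of_not_mem h] using ht⟩

-- B's loop invariant: it scans the fresh first occurrences of rest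
lemma pvGoB_char (z : List Int) : ∀ (rest : List Int) (seen : PySem.Set Int),
    pvGoB z rest seen =
      ((PySem.Set.update seen rest).drop seen.length).find?
        (fun v => PySem.Int.mod ((z.count v : Nat) : Int) 2 == 1) := by
  intro rest
  induction rest with
  | nil => intro seen; simp [pvGoB, PySem.Set.update]
  | cons v rest ih =>
    intro seen
    have hupd : PySem.Set.update seen (v :: rest) = PySem.Set.update (PySem.Set.add seen v) rest := by
      simp [PySem.Set.update]
    by_cases h : v ∈ seen
    · have hstep : pvGoB z (v :: rest) seen = pvGoB z rest seen := by simp [pvGoB, h]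
      rw [hstep, hupd, PySem.Set.add_of_mem h]
      exact ih seen
    · have hadd : PySem.Set.add seen v = seen ++ [v] := PySem.Set.add_of_not_mem h
      obtain ⟨t, ht⟩ := pvUpdate_prefix rest (seen ++ [v])
      have hdrop : (PySem.Set.update seen (v :: rest)).drop seen.length = v :: t := by
        rw [hupd, hadd, ht, List.append_assoc, List.drop_left]; rfl
      have hdrop1 : (PySem.Set.update (seen ++ [v]) rest).drop (seen ++ [v]).length = t := by
        rw [ht, List.drop_left]
      rw [hdrop]
      by_cases hp : PySem.Int.mod ((z.count v : Nat) : Int) 2 == 1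
      · have hp' : (((z.count v : Nat) : Int) % 2 == 1) = true := by simpa using hp
        simp [pvGoB, h, hp']
      · have hstep : pvGoB z (v :: rest) seen = pvGoB z rest (PySem.Set.add seen v) := by
          simp [pvGoB, h]; intro hp2; exact absurd (by simpa using hp2) (by simpa using hp)
        rw [hstep, List.find?_cons_of_neg (by simpa using hp), ih (PySem.Set.add seen v), hadd,
          hdrop1]

lemma pvB_char (x y : List Int) :
    solution_alt x y =
      (PySem.Set.ofList (x ++ y)).find?
        (fun k => PySem.Int.mod (((x ++ y).count k : Nat) : Int) 2 == 1) := by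
  unfold solution_alt
  rw [pvGoB_char]
  simp [PySem.Set.ofList_eq_foldl, PySem.Set.update, PySem.Set.empty]

-- ===== VERDICT (by name: the statement is the Claim_ definition above) =====
theorem solution_spec : Claim_equal_solution := by
  intro x y _
  unfold Spec_solution
  rw [pvA_char, pvB_char]
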